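-- pv_equiv track=rewrite | github.com/ghodsizadeh/jalali-pandas | jalali_pandas/core/calendar.py | jdn_to_jalali
-- ===== SOURCE A (Python) =====
-- def jdn_to_jalali(jdn: int) -> tuple[int, int, int]:
--     """Convert Julian Day Number to Jalali date.
--
--     Args:
--         jdn: Julian Day Number.
--
--     Returns:
--         Tuple of (year, month, day).
--     """
--     # Use the inverse of jalali_to_jdn algorithm
--     # Based on the 2820-year cycle
--     jdn_offset = jdn - 2121445  # Epoch matching jalali_to_jdn
--
--     cycle_2820 = jdn_offset // 1029983
--     day_in_cycle = jdn_offset % 1029983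
--
--     if day_in_cycle < 0:
--         cycle_2820 -= 1
--         day_in_cycle += 1029983
--
--     # Find year within cycle using binary search approach
--     # For year b within cycle, start of year (day=1, month=1) has offset:
--     # 1 + ((b*682-110)//2816) + (b-1)*365
--     def days_to_year_start(b: int) -> int:
--         return 1 + ((b * 682 - 110) // 2816) + (b - 1) * 365
--
--     # Binary search for the year
--     lo, hi = 0, 2820
--     while lo < hi:
--         mid = (lo + hi + 1) // 2
--         if days_to_year_start(mid) <= day_in_cycle:
--             lo = mid
--         else:
--             hi = mid - 1
--
--     year_in_cycle = lo
--     remaining_days = day_in_cycle - days_to_year_start(year_in_cycle)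
--
--     year = cycle_2820 * 2820 + year_in_cycle + 474
--
--     # Find month and day from remaining_days (0-indexed day within year)
--     if remaining_days < 186:  # First 6 months (31 days each)
--         month = remaining_days // 31 + 1
--         day = remaining_days % 31 + 1
--     else:
--         remaining_days -= 186
--         if remaining_days < 150:  # Months 7-11 (30 days each)
--             month = remaining_days // 30 + 7
--             day = remaining_days % 30 + 1
--         else:
--             remaining_days -= 150
--             month = 12
--             day = remaining_days + 1
--
--     return (year, month, day)
-- ===== SOURCE B (Python) =====
-- def jdn_to_jalali(jdn: int) -> tuple[int, int, int]:
--     """Convert Julian Day Number to Jalali date (closed-form year, no search)."""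
--     cycle_2820, day_in_cycle = divmod(jdn - 2121445, 1029983)
--
--     def days_to_year_start(b: int) -> int:
--         return 1 + ((b * 682 - 110) // 2816) + (b - 1) * 365
--
--     # Closed-form year estimate from the mean year length 1028522/2816 days,
--     # corrected by at most one step upward.
--     est = (2816 * day_in_cycle) // 1028522
--     if days_to_year_start(est + 1) <= day_in_cycle:
--         year_in_cycle = est + 1
--     else:
--         year_in_cycle = est
--
--     remaining_days = day_in_cycle - days_to_year_start(year_in_cycle)
--     year = cycle_2820 * 2820 + year_in_cycle + 474
--
--     if remaining_days < 186:
--         month = remaining_days // 31 + 1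
--         day = remaining_days % 31 + 1
--     elif remaining_days < 336:
--         month = (remaining_days - 186) // 30 + 7
--         day = (remaining_days - 186) % 30 + 1
--     else:
--         month = 12
--         day = remaining_days - 335
--     return (year, month, day)
-- ===== Notes on version B (the rewrite author's own statement) =====
-- stated objective: simpler
-- what changed: The binary-search loop over the 2820-year cycle is replaced by a closed-form year estimate (floor-dividing the day-in-cycle by the mean year length 1028522/2816) corrected by at most one step upward.
import Mathlib
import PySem

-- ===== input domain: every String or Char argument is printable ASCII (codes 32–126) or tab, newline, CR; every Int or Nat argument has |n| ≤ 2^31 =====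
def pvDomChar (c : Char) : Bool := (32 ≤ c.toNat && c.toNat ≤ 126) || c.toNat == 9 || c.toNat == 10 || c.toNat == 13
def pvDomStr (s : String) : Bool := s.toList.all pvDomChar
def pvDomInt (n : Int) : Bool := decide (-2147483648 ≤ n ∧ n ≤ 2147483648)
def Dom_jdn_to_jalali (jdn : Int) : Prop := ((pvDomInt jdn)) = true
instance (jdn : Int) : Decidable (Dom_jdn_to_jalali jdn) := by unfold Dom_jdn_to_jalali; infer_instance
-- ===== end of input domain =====

-- B replaces A's binary search for the year in the 2820-year cycle by a closed-form
-- estimate (floor-divide by the mean year length) corrected by at most one step; same result, no loop.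

-- ===== PORT A =====
-- helper days_to_year_start of A
def jdn_days_to_year_start (b : Int) : Int :=
  1 + PySem.Int.floordiv (b * 682 - 110) 2816 + (b - 1) * 365

-- midpoint bounds, needed for the termination of the while-loop port below
theorem jdn_mid_bounds {lo hi : Int} (h : lo < hi) :
    lo + 1 ≤ PySem.Int.floordiv (lo + hi + 1) 2 ∧ PySem.Int.floordiv (lo + hi + 1) 2 ≤ hi := by
  have hm := PySem.Int.floordiv_two_mid_bounds (lo := lo + 1) (hi := hi) (by omega)
  rw [show lo + 1 + hi = lo + hi + 1 from by ring] at hm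
  exact hm

-- the `while lo < hi` loop of A, state (lo, hi)
def jdn_bsearch (d lo hi : Int) : Int × Int :=
  if h : lo < hi then
    let mid := PySem.Int.floordiv (lo + hi + 1) 2
    if jdn_days_to_year_start mid ≤ d then jdn_bsearch d mid hi
    else jdn_bsearch d lo (mid - 1)
  else (lo, hi)
termination_by (hi - lo).toNat
decreasing_by
  · have hm := jdn_mid_bounds h; omega
  · have hm := jdn_mid_bounds h; omega

def jdn_to_jalali (jdn : Int) : Int × Int × Int :=
  let jdn_offset := jdn - 2121445
  let cycle0 := PySem.Int.floordiv jdn_offset 1029983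
  let day0 := PySem.Int.mod jdn_offset 1029983
  let cycle_2820 := if day0 < 0 then cycle0 - 1 else cycle0
  let day_in_cycle := if day0 < 0 then day0 + 1029983 else day0
  let year_in_cycle := (jdn_bsearch day_in_cycle 0 2820).1
  let remaining_days := day_in_cycle - jdn_days_to_year_start year_in_cycle
  let year := cycle_2820 * 2820 + year_in_cycle + 474
  if remaining_days < 186 then
    (year, PySem.Int.floordiv remaining_days 31 + 1, PySem.Int.mod remaining_days 31 + 1)
  else
    let rd := remaining_days - 186
    if rd < 150 then
      (year, PySem.Int.floordiv rd 30 + 7, PySem.Int.mod rd 30 + 1)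
    else
      (year, 12, rd - 150 + 1)

-- ===== PORT B =====
-- helper days_to_year_start of B
def jdn_alt_days_to_year_start (b : Int) : Int :=
  1 + PySem.Int.floordiv (b * 682 - 110) 2816 + (b - 1) * 365

def jdn_to_jalali_alt (jdn : Int) : Int × Int × Int :=
  let cycle_2820 := PySem.Int.floordiv (jdn - 2121445) 1029983
  let day_in_cycle := PySem.Int.mod (jdn - 2121445) 1029983
  let est := PySem.Int.floordiv (2816 * day_in_cycle) 1028522
  let year_in_cycle :=
    if jdn_alt_days_to_year_start (est + 1) ≤ day_in_cycle then est + 1 else est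
  let remaining_days := day_in_cycle - jdn_alt_days_to_year_start year_in_cycle
  let year := cycle_2820 * 2820 + year_in_cycle + 474
  if remaining_days < 186 then
    (year, PySem.Int.floordiv remaining_days 31 + 1, PySem.Int.mod remaining_days 31 + 1)
  else if remaining_days < 336 then
    (year, PySem.Int.floordiv (remaining_days - 186) 30 + 7,
      PySem.Int.mod (remaining_days - 186) 30 + 1)
  else
    (year, 12, remaining_days - 335)

-- ===== PRECONDITION & SPEC =====
def Spec_jdn_to_jalali (jdn : Int) (out : Int × Int × Int) : Prop := out = jdn_to_jalali_alt jdn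
instance (jdn : Int) (out : Int × Int × Int) : Decidable (Spec_jdn_to_jalali jdn out) := by unfold Spec_jdn_to_jalali; infer_instance

-- ===== CLAIM (what is proved, stated in full; the proofs are below) =====
def Claim_equal_jdn_to_jalali : Prop := ∀ (jdn : Int), Dom_jdn_to_jalali jdn → Spec_jdn_to_jalali jdn (jdn_to_jalali jdn)

-- ===== LEMMAS AND PROOFS =====

-- floor-division bracket for a positive divisor
theorem jdn_fdb (a b : Int) (hb : 0 < b) :
    PySem.Int.floordiv a b * b ≤ a ∧ a < PySem.Int.floordiv a b * b + b := by
  have h1 := PySem.Int.floordiv_mul_add_mod a b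
  have h2 := PySem.Int.mod_nonneg a hb
  have h3 := PySem.Int.mod_lt a hb
  constructor <;> linarith

theorem jdn_alt_f_eq : jdn_alt_days_to_year_start = jdn_days_to_year_start := rfl

-- the binary search returns (in its first component) a year r with
-- days_to_year_start r ≤ d < days_to_year_start (r+1), staying inside [lo, hi]
theorem jdn_bsearch_correct (d : Int) :
    ∀ n lo hi, (hi - lo).toNat = n → lo ≤ hi →
      jdn_days_to_year_start lo ≤ d → d < jdn_days_to_year_start (hi + 1) →
      lo ≤ (jdn_bsearch d lo hi).1 ∧ (jdn_bsearch d lo hi).1 ≤ hi ∧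
      jdn_days_to_year_start (jdn_bsearch d lo hi).1 ≤ d ∧
      d < jdn_days_to_year_start ((jdn_bsearch d lo hi).1 + 1) := by
  intro n
  induction n using Nat.strong_induction_on with
  | _ n ih =>
    intro lo hi hn hle hflo hfhi
    rw [jdn_bsearch]
    by_cases h : lo < hi
    · have hm := jdn_mid_bounds h
      simp only [dif_pos h]
      by_cases hc : jdn_days_to_year_start (PySem.Int.floordiv (lo + hi + 1) 2) ≤ d
      · simp only [if_pos hc]
        have := ih (hi - PySem.Int.floordiv (lo + hi + 1) 2).toNat (by omega)
          (PySem.Int.floordiv (lo + hi + 1) 2) hi rfl (by omega) hc hfhi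
        exact ⟨by omega, this.2.1, this.2.2⟩
      · simp only [if_neg hc]
        have := ih (PySem.Int.floordiv (lo + hi + 1) 2 - 1 - lo).toNat (by omega)
          lo (PySem.Int.floordiv (lo + hi + 1) 2 - 1) rfl (by omega) hflo
          (by rw [show PySem.Int.floordiv (lo + hi + 1) 2 - 1 + 1 =
                    PySem.Int.floordiv (lo + hi + 1) 2 from by ring]; omega)
        exact ⟨this.1, by omega, this.2.2⟩
    · simp only [dif_neg h]
      have : lo = hi := by omega
      exact ⟨le_refl _, by omega, hflo, by rw [this]; exact hfhi⟩

-- the closed-form estimate with one-step correction equals the binary-search year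
theorem jdn_year_eq (d : Int) (h0 : 0 ≤ d) (h1 : d < 1029983) :
    (jdn_bsearch d 0 2820).1 =
      (if jdn_days_to_year_start (PySem.Int.floordiv (2816 * d) 1028522 + 1) ≤ d
       then PySem.Int.floordiv (2816 * d) 1028522 + 1
       else PySem.Int.floordiv (2816 * d) 1028522) := by
  have hf0 : jdn_days_to_year_start 0 = -365 := by decide
  have hf2821 : jdn_days_to_year_start 2821 = 1029984 := by decide
  have hbs := jdn_bsearch_correct d 2820 0 2820 (by decide) (by omega)
    (by omega) (by rw [show (2820 : Int) + 1 = 2821 from rfl, hf2821]; omega)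
  set r := (jdn_bsearch d 0 2820).1 with hr
  set est := PySem.Int.floordiv (2816 * d) 1028522 with hest
  obtain ⟨hr0, hr2820, hfr, hfr1⟩ := hbs
  have hestb := jdn_fdb (2816 * d) 1028522 (by norm_num)
  -- expand the two days_to_year_start facts about r into linear inequalities
  have hqr := jdn_fdb (r * 682 - 110) 2816 (by norm_num)
  have hqr1 := jdn_fdb ((r + 1) * 682 - 110) 2816 (by norm_num)
  unfold jdn_days_to_year_start at hfr hfr1
  set qr := PySem.Int.floordiv (r * 682 - 110) 2816 with hqrd
  set qr1 := PySem.Int.floordiv ((r + 1) * 682 - 110) 2816 with hqr1d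
  -- est ≤ r ≤ est + 1
  have hle : est ≤ r := by omega
  have hge : r ≤ est + 1 := by omega
  rcases (by omega : r = est ∨ r = est + 1) with hcase | hcase
  · rw [if_neg]
    · exact hcase
    · intro hc
      unfold jdn_days_to_year_start at hc
      have hq := jdn_fdb ((est + 1) * 682 - 110) 2816 (by norm_num)
      omega
  · rw [if_pos]
    · exact hcase
    · rw [← hcase]; unfold jdn_days_to_year_start; omega

-- ===== VERDICT (by name: the statement is the Claim_ definition above) =====
theorem jdn_to_jalali_spec : Claim_equal_jdn_to_jalali := by
  intro jdn _
  unfold Spec_jdn_to_jalali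
  simp only [jdn_to_jalali, jdn_to_jalali_alt, jdn_alt_f_eq]
  have h0 := PySem.Int.mod_nonneg (jdn - 2121445) (b := 1029983) (by norm_num)
  have h1 := PySem.Int.mod_lt (jdn - 2121445) (b := 1029983) (by norm_num)
  set d := PySem.Int.mod (jdn - 2121445) 1029983 with hd
  rw [if_neg (by omega : ¬ d < 0), if_neg (by omega : ¬ d < 0)]
  rw [jdn_year_eq d h0 h1]
  split_ifs <;> try rfl
  all_goals (first
    | (exfalso; omega)
    | (refine Prod.ext rfl (Prod.ext ?_ ?_) <;> (simp only; try omega)))
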